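-- pv_equiv track=rewrite | github.com/ppljc/omstu-works-4 | Проектирование и тестирование программного обеспечения/lab1/task1_4.py | check_votes_equal
-- ===== SOURCE A (Python) =====
-- def get_lowest_candidate(votes: dict) -> tuple[str, dict]:
--     """
--     Get candidate from dictionary with the lowest votes
--     :param votes: Dictionary with candidates and their votes and indexes
--     :return: A tuple with candidate name and his votes and index
--     """
--     lowest_vote = next(iter(votes.values()))
--     lowest = None
--
--     for candidate, vote in votes.items():
--         if vote['votes'] <= lowest_vote['votes']:
--             lowest_vote = vote
--             lowest = (candidate, vote)
--
--     return lowest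
--
-- def check_votes_equal(votes: dict) -> list:
--     """
--     Check if every candidate vote in list equal
--     :param votes: Dictionary with candidates and their votes and indexes
--     :return: Empty list if candidates votes not equal and list with candidates names if they are equal
--     """
--     lowest_candidate, lowest_vote = get_lowest_candidate(votes)
--
--     result = []
--
--     for candidate, vote in votes.items():
--         if vote['votes'] != lowest_vote['votes']:
--             return []
--
--         result.append(candidate)
--
--     return result
-- ===== SOURCE B (Python) =====
-- def check_votes_equal(votes: dict) -> list:
--     """
--     Check if every candidate vote in list equal
--     :param votes: Dictionary with candidates and their votes and indexes
--     :return: Empty list if candidates votes not equal and list with candidates names if they are equal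
--     """
--     first = next(iter(votes.values()))['votes']
--     if all(v['votes'] == first for v in votes.values()):
--         return list(votes.keys())
--     return []
-- ===== Notes on version B (the rewrite author's own statement) =====
-- stated objective: simpler
-- what changed: Dropped the get_lowest_candidate helper and its separate minimum-finding fold; B reads the first entry's vote count and does a single all()-equality pass against it, returning the key list or [].
-- outside the precondition, e.g. on check_votes_equal({}): A raises StopIteration, B raises StopIteration
import Mathlib
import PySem

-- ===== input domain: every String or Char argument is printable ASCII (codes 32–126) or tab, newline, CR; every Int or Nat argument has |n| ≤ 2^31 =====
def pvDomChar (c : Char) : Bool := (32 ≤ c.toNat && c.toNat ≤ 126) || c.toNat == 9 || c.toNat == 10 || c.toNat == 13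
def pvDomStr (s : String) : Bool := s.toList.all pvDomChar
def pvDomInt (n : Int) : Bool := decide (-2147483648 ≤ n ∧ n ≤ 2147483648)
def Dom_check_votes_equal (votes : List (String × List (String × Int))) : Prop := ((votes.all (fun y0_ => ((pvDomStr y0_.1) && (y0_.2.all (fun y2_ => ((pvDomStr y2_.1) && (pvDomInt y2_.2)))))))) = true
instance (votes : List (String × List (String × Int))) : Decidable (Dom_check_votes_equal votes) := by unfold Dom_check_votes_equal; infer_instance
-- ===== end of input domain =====

-- B drops the minimum-finding helper pass of A and checks all vote counts against the first one in a single pass (objective: simpler).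


-- shared dict primitives: vote['votes'] (total form; Pre_ guarantees the key is present) and the key-presence test
def pvGetVotes (v : List (String × Int)) : Int := (PySem.Dict.mk v).getD "votes" 0
def pvHasVotes (p : String × List (String × Int)) : Bool := (PySem.Dict.mk p.2).contains "votes"

-- ===== PORT A =====
-- get_lowest_candidate: seed lowest_vote with the first value (none = StopIteration on empty dict,
-- excluded by Pre_), then fold the (lowest_vote, lowest) state over all items as the Python loop does
def get_lowest_candidate (votes : List (String × List (String × Int))) :
    Option (String × List (String × Int)) :=
  match votes with
  | [] => none
  | (_, v0) :: _ =>
    (votes.foldl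
      (fun (st : List (String × Int) × Option (String × List (String × Int))) p =>
        if pvGetVotes p.2 ≤ pvGetVotes st.1 then (p.2, some p) else st)
      (v0, none)).2

-- the result loop of check_votes_equal, with its early 'return []'
def pvCheckLoop (lv : List (String × Int)) :
    List (String × List (String × Int)) → List String → List String
  | [], acc => acc
  | p :: rest, acc =>
    if pvGetVotes p.2 ≠ pvGetVotes lv then [] else pvCheckLoop lv rest (acc ++ [p.1])

def check_votes_equal (votes : List (String × List (String × Int))) : List String :=
  match get_lowest_candidate votes with
  | none => []   -- A raises StopIteration here (outside Pre_)
  | some (_, lowest_vote) => pvCheckLoop lowest_vote votes []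

-- ===== PORT B =====
def check_votes_equal_alt (votes : List (String × List (String × Int))) : List String :=
  match votes with
  | [] => []   -- B raises StopIteration here too (outside Pre_)
  | (_, v0) :: _ =>
    let first := pvGetVotes v0
    if votes.all (fun p => pvGetVotes p.2 == first) then votes.map Prod.fst else []

-- ===== PRECONDITION & SPEC =====
-- A raises StopIteration on the empty dict and KeyError when some candidate record lacks the
-- 'votes' key; Pre_ excludes exactly those inputs.
def Pre_check_votes_equal (votes : List (String × List (String × Int))) : Prop :=
  votes ≠ [] ∧ ∀ p ∈ votes, pvHasVotes p = true
instance (votes : List (String × List (String × Int))) : Decidable (Pre_check_votes_equal votes) := by unfold Pre_check_votes_equal; infer_instance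
def pvWitness_check_votes_equal : (List (String × List (String × Int))) :=
  [("a", [("votes", 3)]), ("b", [("votes", 3)])]

def Spec_check_votes_equal (votes : List (String × List (String × Int))) (out : List String) : Prop := out = check_votes_equal_alt votes
instance (votes : List (String × List (String × Int))) (out : List String) : Decidable (Spec_check_votes_equal votes out) := by unfold Spec_check_votes_equal; infer_instance

-- ===== CLAIM (what is proved, stated in full; the proofs are below) =====
def Claim_equal_check_votes_equal : Prop := ∀ (votes : List (String × List (String × Int))), Dom_check_votes_equal votes → Pre_check_votes_equal votes → Spec_check_votes_equal votes (check_votes_equal votes)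

-- ===== LEMMAS AND PROOFS =====

-- A's inner loop returns acc ++ keys when every value matches lv's count, else []
lemma pvCheckLoop_eq (lv : List (String × Int)) :
    ∀ (l : List (String × List (String × Int))) (acc : List String),
      pvCheckLoop lv l acc =
        if l.all (fun p => pvGetVotes p.2 == pvGetVotes lv) then acc ++ l.map Prod.fst else [] := by
  intro l
  induction l with
  | nil => intro acc; simp [pvCheckLoop]
  | cons p rest ih =>
    intro acc
    by_cases h : pvGetVotes p.2 = pvGetVotes lv
    · have h1 : pvCheckLoop lv (p :: rest) acc = pvCheckLoop lv rest (acc ++ [p.1]) := by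
        simp [pvCheckLoop, h]
      rw [h1, ih]
      have hc : (pvGetVotes p.2 == pvGetVotes lv) = true := by simp [h]
      rw [List.all_cons, hc, Bool.true_and]
      simp
    · simp [pvCheckLoop, h, beq_iff_eq]

-- the fold of get_lowest_candidate either leaves the state alone or ends on some visited entry
lemma pvFold_state (l : List (String × List (String × Int))) :
    ∀ (st : List (String × Int) × Option (String × List (String × Int))),
      l.foldl
        (fun st p => if pvGetVotes p.2 ≤ pvGetVotes st.1 then (p.2, some p) else st) st = st ∨
      ∃ q ∈ l,
        l.foldl
          (fun st p => if pvGetVotes p.2 ≤ pvGetVotes st.1 then (p.2, some p) else st) st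
          = (q.2, some q) := by
  induction l with
  | nil => intro st; left; rfl
  | cons x xs ih =>
    intro st
    rw [List.foldl_cons]
    by_cases h : pvGetVotes x.2 ≤ pvGetVotes st.1
    · rcases ih (x.2, some x) with h1 | ⟨q, hq, h2⟩
      · right; exact ⟨x, List.mem_cons_self .., by simp [h, h1]⟩
      · right; exact ⟨q, List.mem_cons_of_mem _ hq, by simp [h, h2]⟩
    · rcases ih st with h1 | ⟨q, hq, h2⟩
      · left; simp [h, h1]
      · right; exact ⟨q, List.mem_cons_of_mem _ hq, by simp [h, h2]⟩

-- on a non-empty dict get_lowest_candidate returns some entry of the dict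
lemma glc_mem (c0 : String) (v0 : List (String × Int))
    (rest : List (String × List (String × Int))) :
    ∃ q ∈ (c0, v0) :: rest, get_lowest_candidate ((c0, v0) :: rest) = some q := by
  have hred : get_lowest_candidate ((c0, v0) :: rest) =
      (rest.foldl
        (fun st p => if pvGetVotes p.2 ≤ pvGetVotes st.1 then (p.2, some p) else st)
        (v0, some (c0, v0))).2 := by
    simp [get_lowest_candidate, List.foldl_cons]
  rw [hred]
  rcases pvFold_state rest (v0, some (c0, v0)) with h1 | ⟨q, hq, h2⟩
  · exact ⟨(c0, v0), List.mem_cons_self .., by simp [h1]⟩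
  · exact ⟨q, List.mem_cons_of_mem _ hq, by simp [h2]⟩

theorem check_votes_equal_spec : Claim_equal_check_votes_equal := by
  intro votes _hdom hpre
  unfold Spec_check_votes_equal
  obtain ⟨hne, _⟩ := hpre
  match hv : votes with
  | [] => exact absurd rfl hne
  | (c0, v0) :: rest =>
    obtain ⟨q, hqmem, hglc⟩ := glc_mem c0 v0 rest
    obtain ⟨qc, qv⟩ := q
    simp only [check_votes_equal, check_votes_equal_alt, hglc]
    rw [pvCheckLoop_eq]
    by_cases hall : ((c0, v0) :: rest).all (fun p => pvGetVotes p.2 == pvGetVotes v0)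
    · have hq : pvGetVotes qv = pvGetVotes v0 := by
        have := List.all_eq_true.mp hall (qc, qv) hqmem
        simpa using this
      have hall' : ((c0, v0) :: rest).all (fun p => pvGetVotes p.2 == pvGetVotes qv) = true := by
        rw [hq]; exact hall
      simp [hall', hall]
    · have hall' : ((c0, v0) :: rest).all (fun p => pvGetVotes p.2 == pvGetVotes qv) = false := by
        by_contra hcon
        have hall2 : ((c0, v0) :: rest).all (fun p => pvGetVotes p.2 == pvGetVotes qv) = true := by
          cases hx : ((c0, v0) :: rest).all (fun p => pvGetVotes p.2 == pvGetVotes qv) with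
          | true => rfl
          | false => exact absurd hx hcon
        have hv0 : pvGetVotes v0 = pvGetVotes qv := by
          have := List.all_eq_true.mp hall2 (c0, v0) (List.mem_cons_self ..)
          simpa using this
        apply hall
        rw [List.all_eq_true] at hall2 ⊢
        intro p hp
        have := hall2 p hp
        simp only [beq_iff_eq] at this ⊢
        rw [this, hv0]
      simp [hall', hall]
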